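-- pv_equiv track=rewrite | github.com/SarunasJ-gif/Street-lights | main.py | backward_lights
-- ===== SOURCE A (Python) =====
-- def backward_lights(x, all_illuminations, not_working_street_lights: list[int]):
--     distance = 0
--     lights_to_check = list(range(x - 1, all_illuminations[0], -1))
--     all_in_list = all(item in not_working_street_lights for item in lights_to_check)
--     if all_in_list:
--         return 0
--     for i in range(x - 1, all_illuminations[0], -1):
--         distance += 20
--         if i not in not_working_street_lights:
--             break
--     return distance
-- ===== SOURCE B (Python) =====
-- def backward_lights(x, all_illuminations, not_working_street_lights: list[int]):
--     broken = set(not_working_street_lights)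
--     working = [i for i in range(x - 1, all_illuminations[0], -1) if i not in broken]
--     if not working:
--         return 0
--     return 20 * (x - max(working))
-- ===== Notes on version B (the rewrite author's own statement) =====
-- stated objective: simpler
-- what changed: Replaces A's all-in-list check plus downward break/accumulator scan by building a set of broken lights, filtering the working positions in one comprehension, and returning the closed form 20*(x - max(working)) (0 if none).
import Mathlib
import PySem

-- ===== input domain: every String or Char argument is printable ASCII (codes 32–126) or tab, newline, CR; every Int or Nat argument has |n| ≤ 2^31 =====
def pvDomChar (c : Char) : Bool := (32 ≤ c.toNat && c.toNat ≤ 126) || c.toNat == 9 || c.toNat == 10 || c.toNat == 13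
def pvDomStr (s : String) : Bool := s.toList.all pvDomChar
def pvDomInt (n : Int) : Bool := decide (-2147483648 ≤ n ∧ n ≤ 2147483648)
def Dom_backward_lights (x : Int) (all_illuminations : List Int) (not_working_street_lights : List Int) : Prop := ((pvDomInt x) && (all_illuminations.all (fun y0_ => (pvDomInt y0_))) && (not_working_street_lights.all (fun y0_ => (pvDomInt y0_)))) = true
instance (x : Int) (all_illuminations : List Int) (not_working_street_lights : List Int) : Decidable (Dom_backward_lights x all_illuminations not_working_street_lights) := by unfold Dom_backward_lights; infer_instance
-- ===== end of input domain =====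

-- B replaces A's all-in-list check plus break-on-first-hit downward scan by a filter of the
-- working positions and the closed form 20*(x - max(working)) (objective: simpler).

-- ===== PORT A =====
-- the for-loop with `distance += 20` and break on `i not in not_working_street_lights`
def backwardLightsLoop (lights : List Int) (nw : List Int) (distance : Int) : Int :=
  match lights with
  | [] => distance
  | i :: rest =>
      let distance := distance + 20
      if !(nw.contains i) then distance else backwardLightsLoop rest nw distance

def backward_lights (x : Int) (all_illuminations : List Int) (not_working_street_lights : List Int) : Int :=
  -- all_illuminations[0]: Pre_ guarantees the list is nonempty, so the default of pyGetD is never used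
  let lights_to_check := PySem.List.pyRange (x - 1) (PySem.List.pyGetD all_illuminations 0 0) (-1)
  let all_in_list := lights_to_check.all (fun item => not_working_street_lights.contains item)
  if all_in_list then 0
  else backwardLightsLoop lights_to_check not_working_street_lights 0

-- ===== PORT B =====
def backward_lights_alt (x : Int) (all_illuminations : List Int) (not_working_street_lights : List Int) : Int :=
  let broken := PySem.Set.ofList not_working_street_lights
  let working := (PySem.List.pyRange (x - 1) (PySem.List.pyGetD all_illuminations 0 0) (-1)).filter
      (fun i => !(PySem.Set.contains broken i))
  match PySem.List.max? working (fun y => y) with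
  | none => 0
  | some m => 20 * (x - m)

-- ===== PRECONDITION & SPEC =====
-- Python A evaluates all_illuminations[0]: it raises IndexError exactly when the list is empty.
def Pre_backward_lights (x : Int) (all_illuminations : List Int) (not_working_street_lights : List Int) : Prop :=
  all_illuminations ≠ []
instance (x : Int) (all_illuminations : List Int) (not_working_street_lights : List Int) : Decidable (Pre_backward_lights x all_illuminations not_working_street_lights) := by unfold Pre_backward_lights; infer_instance
def pvWitness_backward_lights : Int × List Int × List Int := (5, [0], [4, 2])

def Spec_backward_lights (x : Int) (all_illuminations : List Int) (not_working_street_lights : List Int) (out : Int) : Prop := out = backward_lights_alt x all_illuminations not_working_street_lights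
instance (x : Int) (all_illuminations : List Int) (not_working_street_lights : List Int) (out : Int) : Decidable (Spec_backward_lights x all_illuminations not_working_street_lights out) := by unfold Spec_backward_lights; infer_instance

-- ===== CLAIM (what is proved, stated in full; the proofs are below) =====
def Claim_equal_backward_lights : Prop := ∀ (x : Int) (all_illuminations : List Int) (not_working_street_lights : List Int), Dom_backward_lights x all_illuminations not_working_street_lights → Pre_backward_lights x all_illuminations not_working_street_lights → Spec_backward_lights x all_illuminations not_working_street_lights (backward_lights x all_illuminations not_working_street_lights)

-- ===== LEMMAS AND PROOFS =====

theorem foldl_max_of_le {t : List Int} {m : Int} (h : ∀ y ∈ t, y ≤ m) :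
    t.foldl max m = m := by
  induction t with
  | nil => rfl
  | cons y t ih =>
      have hy : max m y = m := max_eq_left (h y (by simp))
      simp only [List.foldl_cons, hy]
      exact ih (fun z hz => h z (by simp [hz]))

/-- Key invariant: if the countdown list from `a` has a first working element `m`,
    then A's break-loop returns `d + 20*(a - m + 1)`, `m` is an upper bound of the rest
    of the filtered list, and `m ≤ a`. -/
theorem loop_key (lo : Int) (nw : List Int) :
    ∀ (n : Nat) (a : Int), (a - lo).toNat = n →
      ∀ d m rest,
      (PySem.List.pyRange a lo (-1)).filter (fun i => !(nw.contains i)) = m :: rest →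
      backwardLightsLoop (PySem.List.pyRange a lo (-1)) nw d = d + 20 * (a - m + 1)
        ∧ (∀ y ∈ rest, y ≤ m) ∧ m ≤ a := by
  intro n
  induction n with
  | zero =>
      intro a hn d m rest h
      rw [PySem.List.pyRange_neg_one_eq_nil (by omega)] at h
      simp at h
  | succ n ih =>
      intro a hn d m rest h
      by_cases hle : a ≤ lo
      · rw [PySem.List.pyRange_neg_one_eq_nil hle] at h; simp at h
      · have hlt : lo < a := lt_of_not_ge hle
        rw [PySem.List.pyRange_neg_one_cons hlt] at h ⊢
        by_cases hmem : a ∈ nw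
        · -- a is broken: the filter skips it, the loop recurses with distance + 20
          rw [List.filter_cons_of_neg (by simp [hmem])] at h
          obtain ⟨h1, h2, h3⟩ := ih (a - 1) (by omega) (d + 20) m rest h
          have hrun : backwardLightsLoop (a :: PySem.List.pyRange (a - 1) lo (-1)) nw d
              = backwardLightsLoop (PySem.List.pyRange (a - 1) lo (-1)) nw (d + 20) := by
            simp [backwardLightsLoop, hmem]
          rw [hrun, h1]
          exact ⟨by ring, h2, by omega⟩
        · -- a itself works: the filter starts with a, the loop breaks immediately
          rw [List.filter_cons_of_pos (by simp [hmem])] at h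
          obtain ⟨he, hrest⟩ := List.cons.inj h
          subst he
          refine ⟨?_, ?_, le_refl _⟩
          · have e : d + 20 * (a - a + 1) = d + 20 := by ring
            rw [e]; simp [backwardLightsLoop, hmem]
          · intro y hy
            have hy' : y ∈ PySem.List.pyRange (a - 1) lo (-1) :=
              List.mem_of_mem_filter (hrest ▸ hy)
            have := (PySem.List.mem_pyRange_neg_one).1 hy'
            omega

theorem filter_nil_iff_all (lo a : Int) (nw : List Int) :
    ((PySem.List.pyRange a lo (-1)).filter (fun i => !(nw.contains i)) = [] ↔
      (PySem.List.pyRange a lo (-1)).all (fun item => nw.contains item) = true) := by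
  simp [List.filter_eq_nil_iff, List.all_eq_true]

theorem set_filter_eq (nw : List Int) (l : List Int) :
    l.filter (fun i => !(PySem.Set.contains (PySem.Set.ofList nw) i))
      = l.filter (fun i => !(nw.contains i)) := by
  apply List.filter_congr
  intro i _
  by_cases h : i ∈ nw <;> simp [h, PySem.Set.contains_iff, PySem.Set.mem_ofList]

-- ===== VERDICT (by name: the statement is the Claim_ definition above) =====
theorem backward_lights_spec : Claim_equal_backward_lights := by
  intro x ai nw _ _
  unfold Spec_backward_lights backward_lights backward_lights_alt
  set lo := PySem.List.pyGetD ai 0 0 with hlo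
  set L := PySem.List.pyRange (x - 1) lo (-1) with hL
  show (if (L.all fun item => nw.contains item) = true then 0
          else backwardLightsLoop L nw 0)
      = (match PySem.List.max?
            (L.filter (fun i => !(PySem.Set.contains (PySem.Set.ofList nw) i))) (fun y => y) with
         | none => 0 | some m => 20 * (x - m))
  rw [set_filter_eq]
  cases hf : L.filter (fun i => !(nw.contains i)) with
  | nil =>
      have hall := (filter_nil_iff_all lo (x - 1) nw).1 (hL ▸ hf)
      rw [← hL] at hall
      rw [if_pos hall]
      simp [PySem.List.max?]
  | cons m rest =>
      obtain ⟨h1, h2, h3⟩ := loop_key lo nw _ (x - 1) rfl 0 m rest (hL ▸ hf)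
      have hnall : (L.all fun item => nw.contains item) ≠ true := by
        intro hall
        have := (filter_nil_iff_all lo (x - 1) nw).2 (hL ▸ hall)
        rw [← hL] at this; rw [hf] at this; exact List.cons_ne_nil _ _ this
      rw [if_neg hnall, PySem.List.max?_id_cons, foldl_max_of_le h2]
      rw [← hL] at h1
      rw [show (match some m with | none => (0:Int) | some m => 20 * (x - m)) = 20 * (x - m) from rfl, h1]
      ring
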